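-- pv_equiv track=rewrite | github.com/yashwatwani/ai-code-doc-generator | run_batch_evaluation.py | check_presence_of_summary
-- ===== SOURCE A (Python) =====
-- def check_presence_of_summary(documentation: str, language: str) -> bool:
--     if not documentation or not documentation.strip():
--         return False
--     doc_lower = documentation.lower()
--     section_headers = ["args:", "parameters:", "@param", "returns:", "@returns", "params:"]
--     first_section_index = len(documentation)
--     for header in section_headers:
--         try:
--             idx = doc_lower.index(header)
--             if idx < first_section_index:
--                 first_section_index = idx
--         except ValueError:
--             continue
--     summary_part = documentation[:first_section_index].strip()
--     # Consider a summary valid if it's not just the start/end markers of the docstring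
--     if language == "python" and (summary_part == '"""' or summary_part == "'''"): return False
--     if language == "javascript" and summary_part == '/**': return False
--     return len(summary_part.split()) > 3
-- ===== SOURCE B (Python) =====
-- def check_presence_of_summary(documentation: str, language: str) -> bool:
--     if not documentation.strip():
--         return False
--     headers = ("args:", "parameters:", "@param", "returns:", "@returns", "params:")
--     low = documentation.lower()
--     cut = len(documentation)
--     for i in range(len(low)):
--         if low.startswith(headers, i):
--             cut = i
--             break
--     summary = documentation[:cut].strip()
--     if summary in ('"""', "'''") and language == "python":
--         return False
--     if summary == '/**' and language == "javascript":
--         return False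
--     return len(summary.split()) > 3
-- ===== Notes on version B (the rewrite author's own statement) =====
-- stated objective: alternative
-- what changed: replaces the per-header .index calls with running-minimum tracking by a single left-to-right scan that stops at the first position where any header begins (str.startswith with a tuple), keeping the guard and summary validation
import Mathlib
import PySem

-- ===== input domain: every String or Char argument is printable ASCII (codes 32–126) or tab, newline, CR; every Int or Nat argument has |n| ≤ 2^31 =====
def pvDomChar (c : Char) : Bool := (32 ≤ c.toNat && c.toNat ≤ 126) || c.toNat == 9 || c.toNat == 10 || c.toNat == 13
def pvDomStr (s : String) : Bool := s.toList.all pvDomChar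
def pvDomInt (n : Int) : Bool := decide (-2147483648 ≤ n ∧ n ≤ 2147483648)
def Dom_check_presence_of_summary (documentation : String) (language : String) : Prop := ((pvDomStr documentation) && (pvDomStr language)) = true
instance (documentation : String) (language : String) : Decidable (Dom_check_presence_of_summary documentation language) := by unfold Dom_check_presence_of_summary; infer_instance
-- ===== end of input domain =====

-- B rewrite: one left-to-right scan stopping at the first position where any header begins,
-- instead of A's per-header .index calls with running-minimum tracking (objective: alternative).

-- ===== PORT A =====
def headersA : List (List Char) :=
  ["args:".toList, "parameters:".toList, "@param".toList,
   "returns:".toList, "@returns".toList, "params:".toList]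

def check_presence_of_summary (documentation : String) (language : String) : Bool :=
  let d := documentation.toList
  if d = [] ∨ PySem.Chars.strip d = [] then false
  else
    let doc_lower := PySem.Chars.lower d
    let first_section_index : Int :=
      headersA.foldl (fun fsi header =>
        let idx := PySem.Chars.find doc_lower header
        if idx ≠ -1 then (if idx < fsi then idx else fsi) else fsi)
        (d.length : Int)
    let summary_part := PySem.Chars.strip (PySem.List.slice d none (some first_section_index))
    if language = "python" ∧ (summary_part = "\"\"\"".toList ∨ summary_part = "'''".toList) then false
    else if language = "javascript" ∧ summary_part = "/**".toList then false
    else (PySem.Chars.split₀ summary_part).length > 3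

-- ===== PORT B =====
-- the `for i in range(len(low)): if low.startswith(headers, i): cut = i; break` loop of Source B
def scanB (hs : List (List Char)) : List Char → Nat → Nat → Nat
  | [], _, n => n
  | c :: t, i, n =>
    if hs.any (fun h => PySem.Chars.startswith (c :: t) h) then i
    else scanB hs t (i + 1) n

def check_presence_of_summary_alt (documentation : String) (language : String) : Bool :=
  let d := documentation.toList
  if PySem.Chars.strip d = [] then false
  else
    let low := PySem.Chars.lower d
    let cut := scanB headersA low 0 d.length
    let summary := PySem.Chars.strip (d.take cut)
    if (summary = "\"\"\"".toList ∨ summary = "'''".toList) ∧ language = "python" then false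
    else if summary = "/**".toList ∧ language = "javascript" then false
    else (PySem.Chars.split₀ summary).length > 3

-- ===== PRECONDITION & SPEC =====
def Spec_check_presence_of_summary (documentation : String) (language : String) (out : Bool) : Prop := out = check_presence_of_summary_alt documentation language
instance (documentation : String) (language : String) (out : Bool) : Decidable (Spec_check_presence_of_summary documentation language out) := by unfold Spec_check_presence_of_summary; infer_instance

-- ===== CLAIM (what is proved, stated in full; the proofs are below) =====
def Claim_equal_check_presence_of_summary : Prop := ∀ (documentation : String) (language : String), Dom_check_presence_of_summary documentation language → Spec_check_presence_of_summary documentation language (check_presence_of_summary documentation language)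

-- ===== LEMMAS AND PROOFS =====
def GoodAt (hs : List (List Char)) (s : List Char) : Prop :=
  ∃ h ∈ hs, h <+: s


theorem scanB_spec (hs : List (List Char)) (hne : ∀ h ∈ hs, h ≠ []) :
    ∀ (l : List Char) (i n : Nat),
      (scanB hs l i n = n ∧ ∀ k, ¬ GoodAt hs (l.drop k))
      ∨ (∃ k, scanB hs l i n = i + k ∧ k < l.length ∧ GoodAt hs (l.drop k)
            ∧ ∀ j < k, ¬ GoodAt hs (l.drop j)) := by
  intro l
  induction l with
  | nil =>
    intro i n
    left
    refine ⟨rfl, ?_⟩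
    rintro k ⟨h, hh, hp⟩
    simp at hp
    exact hne h hh hp
  | cons c t ih =>
    intro i n
    by_cases hg : hs.any (fun h => PySem.Chars.startswith (c :: t) h) = true
    · right
      obtain ⟨h, hh, hp⟩ := List.any_eq_true.mp hg
      refine ⟨0, by simp [scanB, hg], by simp, ⟨h, hh, (PySem.Chars.startswith_iff _ _).mp hp⟩, ?_⟩
      intro j hj; omega
    · have step : scanB hs (c :: t) i n = scanB hs t (i + 1) n := by
        simp [scanB, hg]
      have hG0 : ¬ GoodAt hs (c :: t) := by
        rintro ⟨h, hh, hp⟩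
        exact hg (List.any_eq_true.mpr ⟨h, hh, (PySem.Chars.startswith_iff _ _).mpr hp⟩)
      rcases ih (i + 1) n with ⟨he, hall⟩ | ⟨k, he, hk, hGk, hmin⟩
      · left
        refine ⟨step ▸ he, ?_⟩
        intro k
        cases k with
        | zero => simpa using hG0
        | succ m => simpa using hall m
      · right
        refine ⟨k + 1, by rw [step, he]; omega, by simpa using Nat.succ_lt_succ hk,
          by simpa using hGk, ?_⟩
        intro j hj
        cases j with
        | zero => simpa using hG0
        | succ m => simpa using hmin m (by omega)

theorem foldA_spec (dl : List Char) (hs : List (List Char)) :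
    ∀ acc : Int,
      (hs.foldl (fun fsi header =>
          let idx := PySem.Chars.find dl header
          if idx ≠ -1 then (if idx < fsi then idx else fsi) else fsi) acc = acc
        ∨ ∃ h ∈ hs, hs.foldl (fun fsi header =>
          let idx := PySem.Chars.find dl header
          if idx ≠ -1 then (if idx < fsi then idx else fsi) else fsi) acc
            = PySem.Chars.find dl h ∧ PySem.Chars.find dl h ≠ -1)
      ∧ hs.foldl (fun fsi header =>
          let idx := PySem.Chars.find dl header
          if idx ≠ -1 then (if idx < fsi then idx else fsi) else fsi) acc ≤ acc
      ∧ ∀ h ∈ hs, PySem.Chars.find dl h ≠ -1 →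
          hs.foldl (fun fsi header =>
            let idx := PySem.Chars.find dl header
            if idx ≠ -1 then (if idx < fsi then idx else fsi) else fsi) acc
          ≤ PySem.Chars.find dl h := by
  induction hs with
  | nil => intro acc; exact ⟨Or.inl rfl, le_refl _, by simp⟩
  | cons h hs ih =>
    intro acc
    simp only [List.foldl_cons]
    set idx := PySem.Chars.find dl h with hidx
    set acc' : Int := (fun fsi header =>
          let idx := PySem.Chars.find dl header
          if idx ≠ -1 then (if idx < fsi then idx else fsi) else fsi) acc h with hacc'
    have hA : acc' ≤ acc := by
      rw [hacc']; simp only [← hidx]; split_ifs <;> omega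
    have hB : acc' = acc ∨ (acc' = idx ∧ idx ≠ -1) := by
      rw [hacc']; simp only [← hidx]; split_ifs with h1 h2 <;> tauto
    have hC : idx ≠ -1 → acc' ≤ idx := by
      intro hne'
      rw [hacc']; simp only [← hidx]; split_ifs <;> omega
    obtain ⟨ih1, ih2, ih3⟩ := ih acc'
    refine ⟨?_, ih2.trans hA, ?_⟩
    · rcases ih1 with heq | ⟨h', hh', he', hn'⟩
      · rcases hB with hb | ⟨hb, hbne⟩
        · exact Or.inl (heq.trans hb)
        · exact Or.inr ⟨h, List.mem_cons_self .., heq.trans hb, hbne⟩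
      · exact Or.inr ⟨h', List.mem_cons_of_mem _ hh', he', hn'⟩
    · intro h' hh' hne'
      rcases List.mem_cons.mp hh' with rfl | hh'
      · exact ih2.trans (hC hne')
      · exact ih3 h' hh' hne'

theorem goodAt_find (dl : List Char) {h : List Char} {k : Nat} (hp : h <+: dl.drop k) :
    PySem.Chars.find dl h ≠ -1 ∧ PySem.Chars.find dl h ≤ (k : Int) := by
  have hin : PySem.Chars.isIn h dl = true :=
    (PySem.Chars.exists_prefix_drop_iff_isIn h dl).mp ⟨k, hp⟩
  have hinf : h <:+: dl := (PySem.Chars.isIn_iff_infix h dl).mp hin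
  have hne : PySem.Chars.find dl h ≠ -1 := (PySem.Chars.find_ne_neg_one_iff dl h).mpr hinf
  have hnn : 0 ≤ PySem.Chars.find dl h := (PySem.Chars.find_nonneg_iff dl h).mpr hinf
  have hspec := PySem.Chars.find_spec hnn
  refine ⟨hne, ?_⟩
  by_contra hlt
  push Not at hlt
  exact hspec.2 k (by omega) hp

theorem main_idx (dl : List Char) :
    (headersA.foldl (fun fsi header =>
        let idx := PySem.Chars.find dl header
        if idx ≠ -1 then (if idx < fsi then idx else fsi) else fsi) (dl.length : Int))
    = (scanB headersA dl 0 dl.length : Int) := by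
  have hne : ∀ h ∈ headersA, h ≠ [] := by decide
  obtain ⟨hcase, hle, hmin⟩ := foldA_spec dl headersA (dl.length : Int)
  rcases scanB_spec headersA hne dl 0 dl.length with ⟨he, hall⟩ | ⟨k, he, hk, hGk, hminB⟩
  · rw [he]
    rcases hcase with h | ⟨h, hh, hr, hne'⟩
    · exact h
    · exfalso
      have hinf : h <:+: dl := (PySem.Chars.find_ne_neg_one_iff dl h).mp hne'
      obtain ⟨j, hpj⟩ := (PySem.Chars.exists_prefix_drop_iff_isIn h dl).mpr
        ((PySem.Chars.isIn_iff_infix h dl).mpr hinf)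
      exact hall j ⟨h, hh, hpj⟩
  · rw [he]
    obtain ⟨h0, hh0, hp0⟩ := hGk
    obtain ⟨hfind0, hfind0_le⟩ := goodAt_find dl hp0
    have hrk : (headersA.foldl _ _ : Int) ≤ (k : Int) :=
      (hmin h0 (hh0) hfind0).trans hfind0_le
    rcases hcase with hreq | ⟨h1, hh1, hr1, hne1⟩
    · exfalso
      rw [hreq] at hrk
      have : (k : Int) < (dl.length : Int) := by exact_mod_cast hk
      omega
    · have hnn : 0 ≤ PySem.Chars.find dl h1 := by
        rcases (PySem.Chars.find_nonneg_iff dl h1).mpr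
          ((PySem.Chars.find_ne_neg_one_iff dl h1).mp hne1) with h
        exact h
      have hspec := PySem.Chars.find_spec hnn
      have hGm : GoodAt headersA (dl.drop (PySem.Chars.find dl h1).toNat) :=
        ⟨h1, hh1, hspec.1⟩
      have hnk : ¬ (PySem.Chars.find dl h1).toNat < k := fun hlt => hminB _ hlt hGm
      rw [hr1] at hrk ⊢
      omega


theorem length_lower (l : List Char) : (PySem.Chars.lower l).length = l.length := by
  simp [PySem.Chars.lower]

-- ===== VERDICT (by name: the statement is the Claim_ definition above) =====
theorem check_presence_of_summary_spec : Claim_equal_check_presence_of_summary := by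
  intro documentation language _
  unfold Spec_check_presence_of_summary
  simp only [check_presence_of_summary, check_presence_of_summary_alt]
  by_cases h0 : PySem.Chars.strip documentation.toList = []
  · rw [if_pos (Or.inr h0), if_pos h0]
  · have hd : ¬ (documentation.toList = [] ∨ PySem.Chars.strip documentation.toList = []) := by
      rintro (h | h)
      · apply h0; rw [h]; rfl
      · exact h0 h
    rw [if_neg hd, if_neg h0]
    rw [show documentation.toList.length
          = (PySem.Chars.lower documentation.toList).length from (length_lower _).symm]
    rw [main_idx, PySem.List.slice_to_natCast]
    simp [and_comm]
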